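-- pv_equiv track=rewrite | github.com/Narahari28/adventofcode | tree_house.py | calc_max_from_tops
-- ===== SOURCE A (Python) =====
-- def calc_max_from_tops(grid):
--     maxes = [row[:] for row in grid]
--     for j in range(len(grid[0])):
--         maxes[0][j] = -1
--     for i in range(1, len(grid)):
--         for j in range(len(grid[0])):
--             maxes[i][j] = max(maxes[i-1][j], grid[i-1][j])
--     return maxes
-- ===== SOURCE B (Python) =====
-- def calc_max_from_tops(grid):
--     m = len(grid[0])
--     out = []
--     for i, row in enumerate(grid):
--         new = row[:]
--         for j in range(m):
--             new[j] = max([-1] + [r[j] for r in grid[:i]])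
--         out.append(new)
--     return out
-- ===== Notes on version B (the rewrite author's own statement) =====
-- stated objective: alternative
-- what changed: Replaces A's row-to-row DP recurrence (each result row computed from the previous result row) by a direct per-cell definition: every cell in the first len(grid[0]) columns is the max of -1 and all grid entries above it in its column, computed from the input alone with no carried state; Pre_ excludes only inputs where both programs raise IndexError (empty grid or a row shorter than row 0).
import Mathlib
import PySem

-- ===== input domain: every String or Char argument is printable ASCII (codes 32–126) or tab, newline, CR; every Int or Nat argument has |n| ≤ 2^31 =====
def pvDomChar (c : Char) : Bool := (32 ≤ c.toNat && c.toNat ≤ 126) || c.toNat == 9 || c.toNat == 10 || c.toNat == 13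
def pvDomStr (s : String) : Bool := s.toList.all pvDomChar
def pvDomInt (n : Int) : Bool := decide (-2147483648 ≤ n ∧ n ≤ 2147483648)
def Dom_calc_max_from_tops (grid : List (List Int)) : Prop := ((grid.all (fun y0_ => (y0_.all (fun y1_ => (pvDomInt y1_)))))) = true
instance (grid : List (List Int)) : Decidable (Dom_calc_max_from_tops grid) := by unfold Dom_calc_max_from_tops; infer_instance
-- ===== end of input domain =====

-- B replaces A's row-to-row DP recurrence by a direct per-cell computation: each
-- output cell is the max of -1 and all grid entries above it in its column
-- (objective: alternative — stateless brute force instead of carried DP rows).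

-- ===== PORT A =====
-- All list indices are in range under Pre_; List.modify/List.set realise the in-place
-- assignments maxes[0][j] = -1 and maxes[i][j] = max(maxes[i-1][j], grid[i-1][j]).
def calc_max_from_tops (grid : List (List Int)) : List (List Int) :=
  -- maxes = [row[:] for row in grid]
  let maxes := grid.map (fun row => row)
  -- for j in range(len(grid[0])): maxes[0][j] = -1
  let maxes := (PySem.List.pyRange 0 ((grid.headD []).length : Int)).foldl
      (fun mx j => mx.modify 0 (fun r => r.set j.toNat (-1))) maxes
  -- for i in range(1, len(grid)): for j in range(len(grid[0])): maxes[i][j] = max(maxes[i-1][j], grid[i-1][j])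
  (PySem.List.pyRange 1 (grid.length : Int)).foldl
    (fun mx i =>
      (PySem.List.pyRange 0 ((grid.headD []).length : Int)).foldl
        (fun mx' j =>
          mx'.modify i.toNat (fun r =>
            r.set j.toNat (max ((mx'.getD (i.toNat - 1) []).getD j.toNat 0)
                               ((grid.getD (i.toNat - 1) []).getD j.toNat 0))))
        mx)
    maxes

-- ===== PORT B =====
-- max([-1] + [r[j] for r in grid[:i]]) is the left fold of max over the mapped
-- column entries starting at -1; new[j] = … is List.set (index in range under Pre_).
def calc_max_from_tops_alt (grid : List (List Int)) : List (List Int) :=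
  let m := (grid.headD []).length
  (PySem.List.enumerate grid 0).foldl
    (fun out p =>
      out ++ [(PySem.List.pyRange 0 (m : Int)).foldl
        (fun new j =>
          new.set j.toNat
            (((grid.take p.1.toNat).map (fun r => r.getD j.toNat 0)).foldl max (-1)))
        p.2])
    []

-- ===== PRECONDITION & SPEC =====
-- Pre_ excludes exactly the inputs on which both A and B raise IndexError: the empty
-- grid (grid[0] fails) and grids with a row shorter than row 0 (the write to column j fails).
def Pre_calc_max_from_tops (grid : List (List Int)) : Prop :=
  grid ≠ [] ∧ ∀ row ∈ grid, (grid.headD []).length ≤ row.length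
instance (grid : List (List Int)) : Decidable (Pre_calc_max_from_tops grid) := by
  unfold Pre_calc_max_from_tops; infer_instance

def pvWitness_calc_max_from_tops : List (List Int) := [[1, 2], [3, 4], [0, 5]]

def Spec_calc_max_from_tops (grid : List (List Int)) (out : List (List Int)) : Prop := out = calc_max_from_tops_alt grid
instance (grid : List (List Int)) (out : List (List Int)) : Decidable (Spec_calc_max_from_tops grid out) := by unfold Spec_calc_max_from_tops; infer_instance

-- ===== CLAIM (what is proved, stated in full; the proofs are below) =====
def Claim_equal_calc_max_from_tops : Prop := ∀ (grid : List (List Int)), Dom_calc_max_from_tops grid → Pre_calc_max_from_tops grid → Spec_calc_max_from_tops grid (calc_max_from_tops grid)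

-- ===== LEMMAS AND PROOFS =====

-- Common description of both results: pvRowsOut m run rows emits run ++ row[m:]
-- for each row while folding the running column maxima into run.
def pvRowsOut (m : Nat) (run : List Int) : List (List Int) → List (List Int)
  | [] => []
  | row :: rest => (run ++ row.drop m) :: pvRowsOut m (List.zipWith max run (row.take m)) rest

def pvRun (m : Nat) (run : List Int) : List (List Int) → List Int
  | [] => run
  | row :: rest => pvRun m (List.zipWith max run (row.take m)) rest

lemma pvRowsOut_length (m : Nat) (rows : List (List Int)) :
    ∀ run, (pvRowsOut m run rows).length = rows.length := by
  induction rows with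
  | nil => intro run; rfl
  | cons row rest ih => intro run; simp [pvRowsOut, ih]

lemma pvRowsOut_append_singleton (m : Nat) (rows : List (List Int)) :
    ∀ run row, pvRowsOut m run (rows ++ [row])
      = pvRowsOut m run rows ++ [pvRun m run rows ++ row.drop m] := by
  induction rows with
  | nil => intro run row; simp [pvRowsOut, pvRun]
  | cons r rest ih => intro run row; simp [pvRowsOut, pvRun, ih]

lemma pvRun_append_singleton (m : Nat) (rows : List (List Int)) :
    ∀ run row, pvRun m run (rows ++ [row])
      = List.zipWith max (pvRun m run rows) (row.take m) := by
  induction rows with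
  | nil => intro run row; simp [pvRun]
  | cons r rest ih => intro run row; simp [pvRun, ih]

lemma pvRun_length (m : Nat) (rows : List (List Int)) :
    ∀ run, run.length = m → (∀ row ∈ rows, m ≤ row.length) →
      (pvRun m run rows).length = m := by
  induction rows with
  | nil => intro run h _; simpa [pvRun] using h
  | cons r rest ih =>
      intro run h hall
      have hr : m ≤ r.length := hall r (by simp)
      refine ih _ ?_ (fun row hrow => hall row (by simp [hrow]))
      simp [List.length_zipWith, h]
      omega

-- pvRun read at column j is the brute-force fold of max over that column.
lemma pvRun_getD (m : Nat) (rows : List (List Int)) :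
    ∀ run, run.length = m → (∀ row ∈ rows, m ≤ row.length) → ∀ j, j < m →
      (pvRun m run rows).getD j 0
        = (rows.map (fun r => r.getD j 0)).foldl max (run.getD j 0) := by
  induction rows with
  | nil => intro run _ _ j _; simp [pvRun]
  | cons r rest ih =>
      intro run hrun hall j hj
      have hr : m ≤ r.length := hall r (by simp)
      have hlen : (List.zipWith max run (r.take m)).length = m := by
        simp [List.length_zipWith, hrun]; omega
      have hstep : (List.zipWith max run (r.take m)).getD j 0
          = max (run.getD j 0) (r.getD j 0) := by
        have hjz : j < (List.zipWith max run (r.take m)).length := by omega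
        rw [List.getD_eq_getElem _ _ hjz, List.getElem_zipWith,
          List.getD_eq_getElem _ _ (show j < run.length by omega),
          List.getD_eq_getElem _ _ (show j < r.length by omega)]
        simp [List.getElem_take]
      simp only [pvRun, List.map_cons, List.foldl_cons]
      rw [ih _ hlen (fun row hrow => hall row (by simp [hrow])) j hj, hstep]

lemma pv_getD_append_length (l1 l2 : List (List Int)) (x : List Int) :
    (l1 ++ x :: l2).getD l1.length [] = x := by
  simp [List.getD_eq_getElem?_getD]

lemma pv_modify_append (l1 l2 : List (List Int)) (x : List Int) (f : List Int → List Int) :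
    (l1 ++ x :: l2).modify l1.length f = l1 ++ f x :: l2 := by
  induction l1 with
  | nil => rfl
  | cons a l ih => simp [ih]

lemma pv_modify_modify (l : List (List Int)) (i : Nat) (f g : List Int → List Int) :
    (l.modify i f).modify i g = l.modify i (fun x => g (f x)) := by
  induction l generalizing i with
  | nil => simp
  | cons a l ih => cases i <;> simp [ih]

lemma pv_setFill (vals r : List Int) (k : Nat) (hk : k < r.length) (hv : k < vals.length) :
    (vals.take k ++ r.drop k).set k (vals.getD k 0) = vals.take (k + 1) ++ r.drop (k + 1) := by
  rw [List.drop_eq_getElem_cons hk, List.set_append]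
  have hlen : (vals.take k).length = k := by simp; omega
  rw [if_neg (by omega), hlen, Nat.sub_self, List.set_cons_zero,
    List.getD_eq_getElem _ _ hv]
  rw [show List.take (k + 1) vals = List.take k vals ++ [vals[k]] from by
    rw [List.take_add_one, List.getElem?_eq_getElem hv]; rfl]
  rw [List.append_assoc]
  rfl

lemma pv_init (r : List Int) (rest : List (List Int)) (m' : Nat) (hm : m' ≤ r.length) :
    (PySem.List.pyRange 0 (m' : Int)).foldl
      (fun mx j => mx.modify 0 (fun row => row.set j.toNat (-1))) (r :: rest)
    = (List.replicate m' (-1) ++ r.drop m') :: rest := by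
  induction m' with
  | zero => simp [pysem]
  | succ k ih =>
      have hk : k ≤ r.length := by omega
      rw [show ((k + 1 : Nat) : Int) = (k : Int) + 1 by push_cast; ring,
        PySem.List.pyRange_one_succ_right (by positivity), List.foldl_append, ih hk]
      simp only [List.foldl_cons, List.foldl_nil, List.modify, Int.toNat_natCast]
      have := pv_setFill (List.replicate (k + 1) (-1)) r k (by omega) (by simp)
      simp only [List.take_replicate, List.getD_eq_getElem?_getD, List.getElem?_replicate,
        if_pos (Nat.lt_succ_self k)] at this
      simp only [Nat.min_def, if_pos (Nat.le_succ k)] at this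
      simpa using this

lemma pv_inner (g : List (List Int)) (i : Nat) (hi : 1 ≤ i) (mx : List (List Int))
    (vals : List Int) (m' : Nat)
    (hvals : ∀ j, j < m' → vals.getD j 0
      = max ((mx.getD (i - 1) []).getD j 0) ((g.getD (i - 1) []).getD j 0))
    (hr : m' ≤ (mx.getD i []).length) (hv : m' ≤ vals.length) :
    (PySem.List.pyRange 0 (m' : Int)).foldl
      (fun mx' j => mx'.modify i (fun r => r.set j.toNat
        (max ((mx'.getD (i - 1) []).getD j.toNat 0) ((g.getD (i - 1) []).getD j.toNat 0)))) mx
    = mx.modify i (fun r => vals.take m' ++ r.drop m') := by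
  induction m' with
  | zero =>
      simp [pysem]
      exact (List.modify_id i mx).symm
  | succ k ih =>
      rw [show ((k + 1 : Nat) : Int) = (k : Int) + 1 by push_cast; ring,
        PySem.List.pyRange_one_succ_right (by positivity), List.foldl_append,
        ih (fun j hj => hvals j (by omega)) (by omega) (by omega)]
      simp only [List.foldl_cons, List.foldl_nil, Int.toNat_natCast]
      have hne : i ≠ i - 1 := by omega
      have hread : (mx.modify i (fun r => List.take k vals ++ List.drop k r)).getD (i - 1) []
          = mx.getD (i - 1) [] := by
        simp [List.getD_eq_getElem?_getD, List.getElem?_modify, if_neg hne]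
      simp only [hread]
      rw [pv_modify_modify, List.modify_eq_set, List.modify_eq_set]
      congr 1
      have hx : (mx[i]?.getD default : List Int) = mx.getD i [] := by
        simp [List.getD_eq_getElem?_getD]; rfl
      rw [hx]
      rw [← hvals k (by omega)]
      exact pv_setFill vals (mx.getD i []) k (by omega) (by omega)

lemma pv_outer (grid : List (List Int)) (m : Nat) (hm : ∀ row ∈ grid, m ≤ row.length)
    (k : Nat) (hk : k + 1 ≤ grid.length) :
    (PySem.List.pyRange 1 ((k + 1 : Nat) : Int)).foldl
      (fun mx i =>
        (PySem.List.pyRange 0 (m : Int)).foldl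
          (fun mx' j =>
            mx'.modify i.toNat (fun r =>
              r.set j.toNat (max ((mx'.getD (i.toNat - 1) []).getD j.toNat 0)
                                 ((grid.getD (i.toNat - 1) []).getD j.toNat 0))))
          mx)
      (pvRowsOut m (List.replicate m (-1)) (grid.take 1) ++ grid.drop 1)
    = pvRowsOut m (List.replicate m (-1)) (grid.take (k + 1)) ++ grid.drop (k + 1) := by
  induction k with
  | zero => simp [PySem.List.pyRange_one]
  | succ k ih =>
      have hkn : k + 1 < grid.length := by omega
      rw [show ((k + 1 + 1 : Nat) : Int) = ((k + 1 : Nat) : Int) + 1 by push_cast; ring,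
        PySem.List.pyRange_one_succ_right (by omega), List.foldl_append, ih (by omega)]
      simp only [List.foldl_cons, List.foldl_nil, Int.toNat_natCast]
      set rep : List Int := List.replicate m (-1) with hrep
      set L : List (List Int) := pvRowsOut m rep (grid.take (k + 1)) with hL
      have hLlen : L.length = k + 1 := by
        rw [hL, pvRowsOut_length, List.length_take]; omega
      have hdrop : grid.drop (k + 1) = grid[k + 1] :: grid.drop (k + 2) :=
        List.drop_eq_getElem_cons hkn
      have htake1 : grid.take (k + 1) = grid.take k ++ [grid[k]] := by
        rw [List.take_add_one, List.getElem?_eq_getElem (by omega)]; rfl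
      have htake2 : grid.take (k + 2) = grid.take (k + 1) ++ [grid[k + 1]] := by
        rw [show k + 2 = (k + 1) + 1 by ring, List.take_add_one,
          List.getElem?_eq_getElem hkn]; rfl
      have hprevlen : (pvRun m rep (grid.take k)).length = m :=
        pvRun_length m _ rep (by simp [hrep]) (fun row hrow => hm row (List.mem_of_mem_take hrow))
      have hgk : m ≤ grid[k].length := hm _ (List.getElem_mem _)
      have hgk1 : m ≤ grid[k + 1].length := hm _ (List.getElem_mem _)
      have hvalslen : (pvRun m rep (grid.take (k + 1))).length = m :=
        pvRun_length m _ rep (by simp [hrep]) (fun row hrow => hm row (List.mem_of_mem_take hrow))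
      have hrowk : L.getD k [] = pvRun m rep (grid.take k) ++ grid[k].drop m := by
        rw [hL, htake1, pvRowsOut_append_singleton]
        have hlen0 : (pvRowsOut m rep (grid.take k)).length = k := by
          rw [pvRowsOut_length, List.length_take]; omega
        have h2 := pv_getD_append_length (pvRowsOut m rep (grid.take k)) []
          (pvRun m rep (grid.take k) ++ grid[k].drop m)
        rw [hlen0] at h2
        exact h2
      have hvals : ∀ j, j < m → (pvRun m rep (grid.take (k + 1))).getD j 0
          = max (((L ++ grid.drop (k + 1)).getD (k + 1 - 1) []).getD j 0)
                ((grid.getD (k + 1 - 1) []).getD j 0) := by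
        intro j hj
        have h1 : (L ++ grid.drop (k + 1)).getD (k + 1 - 1) [] = L.getD k [] := by
          simp only [Nat.add_sub_cancel]
          exact List.getD_append _ _ _ k (by omega)
        simp only [Nat.add_sub_cancel]
        simp only [Nat.add_sub_cancel] at h1
        rw [h1, hrowk, List.getD_append _ _ _ j (by omega), htake1, pvRun_append_singleton]
        have hjz : j < (List.zipWith max (pvRun m rep (grid.take k)) (grid[k].take m)).length := by
          simp [List.length_zipWith]; omega
        rw [List.getD_eq_getElem _ _ hjz, List.getElem_zipWith]
        rw [List.getD_eq_getElem _ _ (show j < (pvRun m rep (grid.take k)).length by omega),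
          List.getD_eq_getElem _ _ (show k < grid.length by omega),
          List.getD_eq_getElem _ _ (show j < grid[k].length by omega)]
        simp [List.getElem_take]
      have hrk1 : (L ++ grid.drop (k + 1)).getD (k + 1) [] = grid[k + 1] := by
        have h2 := pv_getD_append_length L (grid.drop (k + 2)) grid[k + 1]
        rw [hLlen] at h2
        rw [hdrop]
        exact h2
      rw [pv_inner grid (k + 1) (by omega) (L ++ grid.drop (k + 1))
        (pvRun m rep (grid.take (k + 1))) m hvals (by rw [hrk1]; exact hgk1) (by omega)]
      rw [hdrop]
      have hmod := pv_modify_append L (grid.drop (k + 2)) grid[k + 1]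
        (fun r => List.take m (pvRun m rep (grid.take (k + 1))) ++ List.drop m r)
      rw [hLlen] at hmod
      rw [hmod, List.take_of_length_le (by omega),
        show k + 1 + 1 = k + 2 from rfl, htake2, pvRowsOut_append_singleton]
      simp
      exact hL

-- A equals the common description.
lemma pv_A_eq (grid : List (List Int)) (hpre : Pre_calc_max_from_tops grid) :
    calc_max_from_tops grid
      = pvRowsOut (grid.headD []).length
          (List.replicate (grid.headD []).length (-1)) grid := by
  obtain ⟨hne, hrows⟩ := hpre
  obtain ⟨r0, rest, rfl⟩ := List.exists_cons_of_ne_nil hne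
  simp only [List.headD_cons] at hrows ⊢
  simp only [calc_max_from_tops, List.headD_cons, List.length_cons]
  rw [show (r0 :: rest).map (fun row => row) = r0 :: rest by simp]
  rw [pv_init r0 rest r0.length (le_refl _)]
  have hinit : (List.replicate r0.length (-1) ++ r0.drop r0.length) :: rest
      = pvRowsOut r0.length (List.replicate r0.length (-1)) ((r0 :: rest).take 1)
        ++ (r0 :: rest).drop 1 := by
    simp [pvRowsOut]
  rw [hinit, pv_outer (r0 :: rest) r0.length hrows rest.length (by simp)]
  rw [List.take_of_length_le (by simp), List.drop_eq_nil_of_le (by simp)]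
  simp

-- Folding "append one element" is map.
lemma pv_foldl_snoc {α : Type} (g : α → List Int) (l : List α) :
    ∀ acc, l.foldl (fun out x => out ++ [g x]) acc = acc ++ l.map g := by
  induction l with
  | nil => intro acc; simp
  | cons x rest ih => intro acc; simp [ih]

-- B's inner loop overwrites the first m' cells of the row with v 0, …, v (m'-1).
lemma pv_setrow (m : Nat) (v : Nat → Int) (row : List Int) (hm : m ≤ row.length)
    (m' : Nat) (hm' : m' ≤ m) :
    (PySem.List.pyRange 0 (m' : Int)).foldl
      (fun new j => new.set j.toNat (v j.toNat)) row
    = ((List.range m).map v).take m' ++ row.drop m' := by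
  induction m' with
  | zero => simp [pysem]
  | succ k ih =>
      rw [show ((k + 1 : Nat) : Int) = (k : Int) + 1 by push_cast; ring,
        PySem.List.pyRange_one_succ_right (by positivity), List.foldl_append, ih (by omega)]
      simp only [List.foldl_cons, List.foldl_nil, Int.toNat_natCast]
      have hv : k < ((List.range m).map v).length := by simp; omega
      have := pv_setFill ((List.range m).map v) row k (by omega) hv
      rw [List.getD_eq_getElem _ _ hv] at this
      simpa using this

-- B's per-row values: the brute-force column maxima over the rows above equal pvRun.
lemma pv_vals_eq_run (grid : List (List Int)) (m : Nat)
    (hm : ∀ row ∈ grid, m ≤ row.length) (i : Nat) :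
    (List.range m).map (fun j =>
        ((grid.take i).map (fun r => r.getD j 0)).foldl max (-1))
      = pvRun m (List.replicate m (-1)) (grid.take i) := by
  have hlen : (pvRun m (List.replicate m (-1)) (grid.take i)).length = m :=
    pvRun_length m _ _ (by simp) (fun row hrow => hm row (List.mem_of_mem_take hrow))
  apply List.ext_getElem (by simp [hlen])
  intro j h1 h2
  have hj : j < m := by simpa using h1
  have := pvRun_getD m (grid.take i) (List.replicate m (-1)) (by simp)
    (fun row hrow => hm row (List.mem_of_mem_take hrow)) j hj
  rw [List.getD_eq_getElem _ _ h2] at this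
  simp only [List.getElem_map, List.getElem_range]
  rw [this]
  congr 1
  simp [List.getD_eq_getElem?_getD, List.getElem?_replicate, if_pos hj]

-- B's enumerate fold, started after an arbitrary processed prefix, is pvRowsOut.
lemma pv_B_rows (grid : List (List Int)) (m : Nat)
    (hm : ∀ row ∈ grid, m ≤ row.length) :
    ∀ (rows pre : List (List Int)), grid = pre ++ rows →
      (PySem.List.enumerate rows (pre.length : Int)).map
        (fun p => (PySem.List.pyRange 0 (m : Int)).foldl
          (fun new j =>
            new.set j.toNat
              (((grid.take p.1.toNat).map (fun r => r.getD j.toNat 0)).foldl max (-1)))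
          p.2)
      = pvRowsOut m (pvRun m (List.replicate m (-1)) pre) rows := by
  intro rows
  induction rows with
  | nil => intro pre _; simp [PySem.List.enumerate, pvRowsOut]
  | cons row rest ih =>
      intro pre hsplit
      have hrow : m ≤ row.length := hm row (by simp [hsplit])
      rw [PySem.List.enumerate_cons]
      simp only [List.map_cons, pvRowsOut]
      have htake : grid.take pre.length = pre := by
        rw [hsplit, List.take_append_of_le_length (le_refl _), List.take_length]
      congr 1
      · -- head: the inner set-loop fills pvRun of the prefix, tail of row kept
        have hfold := pv_setrow m
          (fun j => ((grid.take pre.length).map (fun r => r.getD j 0)).foldl max (-1))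
          row hrow m (le_refl m)
        simp only [Int.toNat_natCast]
        rw [hfold, List.take_of_length_le (by simp)]
        rw [pv_vals_eq_run grid m hm pre.length, htake]
      · -- tail: apply IH with prefix pre ++ [row]
        have h2 := ih (pre ++ [row]) (by simp [hsplit])
        rw [show ((pre.length : Int) + 1) = (((pre ++ [row]).length : Nat) : Int) by
          simp] at *
        rw [show pvRun m (List.replicate m (-1)) (pre ++ [row])
            = List.zipWith max (pvRun m (List.replicate m (-1)) pre) (row.take m) from
          pvRun_append_singleton m pre _ row] at h2
        simpa using h2

-- B equals the common description.
lemma pv_B_eq (grid : List (List Int)) (hpre : Pre_calc_max_from_tops grid) :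
    calc_max_from_tops_alt grid
      = pvRowsOut (grid.headD []).length
          (List.replicate (grid.headD []).length (-1)) grid := by
  obtain ⟨hne, hrows⟩ := hpre
  simp only [calc_max_from_tops_alt]
  rw [pv_foldl_snoc, List.nil_append]
  have := pv_B_rows grid (grid.headD []).length hrows grid [] (by simp)
  simpa [pvRun] using this

-- ===== VERDICT (by name: the statement is the Claim_ definition above) =====
theorem calc_max_from_tops_spec : Claim_equal_calc_max_from_tops := by
  intro grid _ hpre
  unfold Spec_calc_max_from_tops
  rw [pv_A_eq grid hpre, pv_B_eq grid hpre]
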